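-- pv_equiv track=rewrite | github.com/abizovnuralem/go2_ros2_sdk | go2_robot_sdk/go2_robot_sdk/infrastructure/webrtc/crypto/encryption.py | calc_local_path_ending
-- ===== SOURCE A (Python) =====
-- class EncryptionError(Exception):
--     """Custom exception for encryption-related errors"""
--     pass
--
-- def calc_local_path_ending(data1: str) -> str:
--     """Calculate local path ending from server response"""
--     try:
--         # Initialize an array of strings
--         str_arr = ["A", "B", "C", "D", "E", "F", "G", "H", "I", "J"]
--
--         # Extract the last 10 characters of data1
--         last_10_chars = data1[-10:]
--
--         # Split the last 10 characters into chunks of size 2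
--         chunked = [last_10_chars[i:i + 2] for i in range(0, len(last_10_chars), 2)]
--
--         # Initialize an empty list to store indices
--         array_list = []
--
--         # Iterate over the chunks and find the index of the second character in str_arr
--         for chunk in chunked:
--             if len(chunk) > 1:
--                 second_char = chunk[1]
--                 try:
--                     index = str_arr.index(second_char)
--                     array_list.append(index)
--                 except ValueError:
--                     # Handle case where the character is not found in str_arr
--                     # Following original implementation - ignore unknown characters
--                     pass
--
--         # Convert array_list to a string without separators
--         join_to_string = ''.join(map(str, array_list))
--
--         return join_to_string
--
--     except Exception as e:
--         raise EncryptionError(f"Failed to calculate path ending: {e}")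
-- ===== SOURCE B (Python) =====
-- class EncryptionError(Exception):
--     """Custom exception for encryption-related errors"""
--     pass
--
-- def calc_local_path_ending(data1: str) -> str:
--     """Calculate local path ending from server response"""
--     s = data1[-10:]
--     return ''.join(chr(ord(c) - 17)
--                    for i, c in enumerate(s)
--                    if i % 2 == 1 and 'A' <= c <= 'J')
-- ===== Notes on version B (the rewrite author's own statement) =====
-- stated objective: simpler
-- what changed: B drops the chunk construction and the list.index search entirely: it enumerates the last-10 slice once, keeps the odd-position characters in 'A'..'J', and computes each digit in closed form as chr(ord(c)-17).
import Mathlib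
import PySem

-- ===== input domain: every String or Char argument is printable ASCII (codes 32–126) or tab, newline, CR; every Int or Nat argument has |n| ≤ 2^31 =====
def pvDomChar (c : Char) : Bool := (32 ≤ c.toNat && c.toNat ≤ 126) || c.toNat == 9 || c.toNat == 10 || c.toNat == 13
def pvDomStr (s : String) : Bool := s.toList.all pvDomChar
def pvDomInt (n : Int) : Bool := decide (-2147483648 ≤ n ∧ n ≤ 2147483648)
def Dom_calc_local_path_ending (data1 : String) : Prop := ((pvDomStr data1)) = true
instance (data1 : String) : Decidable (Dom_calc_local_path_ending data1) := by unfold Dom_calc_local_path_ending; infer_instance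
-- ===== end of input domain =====

-- B replaces A's chunk construction and list.index scan by a single enumerate pass
-- keeping odd-position characters in 'A'..'J' with the closed-form digit chr(ord(c)-17); objective: simpler.

-- ===== PORT A =====
def strArrA : List Char := ['A', 'B', 'C', 'D', 'E', 'F', 'G', 'H', 'I', 'J']

def calc_local_path_ending (data1 : String) : String :=
  let last10 := PySem.List.slice data1.toList (some (-10)) none
  let chunked := (PySem.List.pyRange 0 (last10.length : Int) 2).map
      (fun i => PySem.List.slice last10 (some i) (some (i + 2)))
  let arrayList := chunked.foldl
      (fun acc chunk =>
        if chunk.length > 1 then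
          -- str_arr.index(second_char) with the ValueError swallowed → match on index?
          match PySem.List.index? strArrA (PySem.List.pyGetD chunk 1 ' ') with
          | some idx => acc ++ [(idx : Int)]
          | none => acc
        else acc) []
  String.ofList (arrayList.map (fun n => (PySem.Int.toStr n).toList)).flatten

-- ===== PORT B =====
def calc_local_path_ending_alt (data1 : String) : String :=
  let s := PySem.List.slice data1.toList (some (-10)) none
  String.ofList
    (((PySem.List.enumerate s).filter
        (fun p => p.1 % 2 == 1 && decide ('A' ≤ p.2) && decide (p.2 ≤ 'J'))).map
      (fun p => Char.ofNat (p.2.toNat - 17)))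

-- ===== PRECONDITION & SPEC =====
def Spec_calc_local_path_ending (data1 : String) (out : String) : Prop := out = calc_local_path_ending_alt data1
instance (data1 : String) (out : String) : Decidable (Spec_calc_local_path_ending data1 out) := by unfold Spec_calc_local_path_ending; infer_instance

-- ===== CLAIM (what is proved, stated in full; the proofs are below) =====
def Claim_equal_calc_local_path_ending : Prop := ∀ (data1 : String), Dom_calc_local_path_ending data1 → Spec_calc_local_path_ending data1 (calc_local_path_ending data1)

-- ===== LEMMAS AND PROOFS =====

-- A's per-chunk contribution to array_list
def pvG (chunk : List Char) : List Int :=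
  if chunk.length > 1 then
    match PySem.List.index? strArrA (PySem.List.pyGetD chunk 1 ' ') with
    | some idx => [(idx : Int)]
    | none => []
  else []

-- A's chunk list (the body of `chunked` over an arbitrary list)
def pvChunks (l : List Char) : List (List Char) :=
  (PySem.List.pyRange 0 (l.length : Int) 2).map
    (fun i => PySem.List.slice l (some i) (some (i + 2)))

-- common specification: digit of every odd-position char in 'A'..'J'
def pvSpec : List Char → List Char
  | [] => []
  | [_] => []
  | _ :: b :: t =>
      (if 'A' ≤ b ∧ b ≤ 'J' then [Char.ofNat (b.toNat - 17)] else []) ++ pvSpec t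

theorem pvFoldl_eq (cs : List (List Char)) (acc : List Int) :
    cs.foldl
      (fun acc chunk =>
        if chunk.length > 1 then
          match PySem.List.index? strArrA (PySem.List.pyGetD chunk 1 ' ') with
          | some idx => acc ++ [(idx : Int)]
          | none => acc
        else acc) acc = acc ++ cs.flatMap pvG := by
  induction cs generalizing acc with
  | nil => simp
  | cons c cs ih =>
      simp only [List.foldl_cons, List.flatMap_cons, ih, pvG]
      split
      · cases PySem.List.index? strArrA (PySem.List.pyGetD c 1 ' ') <;> simp
      · simp

theorem pvChunks_nil : pvChunks [] = [] := by decide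

theorem pvChunks_one (a : Char) : pvChunks [a] = [[a]] := by
  have h1 : PySem.List.pyRange 0 (1 : Int) 2 = [0] := by decide
  simp only [pvChunks, List.length_singleton, Nat.cast_one, h1, List.map_cons, List.map_nil]
  rw [PySem.List.slice_toNat _ (by omega) (by omega)]
  norm_num

theorem pvChunks_cons2 (a b : Char) (t : List Char) :
    pvChunks (a :: b :: t) = [a, b] :: pvChunks t := by
  have hr : ∀ n : Nat, PySem.List.pyRange 0 (n : Int) 2 =
      (List.range ((n + 1) / 2)).map (fun (k : Nat) => (0 : Int) + 2 * (k : Int)) := by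
    intro n
    rw [PySem.List.pyRange_of_pos _ _ (by omega)]
    rcases Nat.eq_zero_or_pos n with h | h
    · subst h; simp
    · have hlt : (0 : Int) < n := by exact_mod_cast h
      have hc : (((n : Int) - 0 + 2 - 1) / 2).toNat = (n + 1) / 2 := by omega
      rw [if_pos hlt, hc]
  have hlen : (a :: b :: t).length = t.length + 2 := by simp
  simp only [pvChunks, hlen, hr]
  have hq : (t.length + 2 + 1) / 2 = (t.length + 1) / 2 + 1 := by omega
  rw [hq, List.range_succ_eq_map]
  simp only [List.map_cons, List.map_map]
  congr 1
  -- the remaining goal: tail chunks shift by one pair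
  apply List.map_congr_left
  intro k _
  simp only [Function.comp_apply]
  rw [PySem.List.slice_toNat _ (by positivity) (by positivity),
      PySem.List.slice_toNat _ (by positivity) (by positivity)]
  have e1 : ((0 : Int) + 2 * ((Nat.succ k : Nat) : Int)).toNat = 2 * k + 1 + 1 := by omega
  have e2 : ((0 : Int) + 2 * ((Nat.succ k : Nat) : Int) + 2).toNat = 2 * k + 4 := by omega
  have e3 : ((0 : Int) + 2 * ((k : Nat) : Int)).toNat = 2 * k := by omega
  have e4 : ((0 : Int) + 2 * ((k : Nat) : Int) + 2).toNat = 2 * k + 2 := by omega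
  rw [e1, e2, e3, e4]
  simp [List.drop_succ_cons]

theorem pvCharEq (b : Char) {n : Nat} (h : b.toNat = n) : b = Char.ofNat n := by
  rw [← h, Char.ofNat_toNat]

theorem pvG_pair (a b : Char) :
    ((pvG [a, b]).map (fun n => (PySem.Int.toStr n).toList)).flatten =
      if 'A' ≤ b ∧ b ≤ 'J' then [Char.ofNat (b.toNat - 17)] else [] := by
  have hget : PySem.List.pyGetD [a, b] 1 ' ' = b := by
    simp [PySem.List.pyGetD, PySem.List.pyGet?, PySem.List.pyIdx?]
  by_cases h : 'A' ≤ b ∧ b ≤ 'J'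
  · obtain ⟨h1, h2⟩ := h
    rw [Char.le_def, UInt32.le_iff_toNat_le] at h1 h2
    have hb : b.toNat = 65 ∨ b.toNat = 66 ∨ b.toNat = 67 ∨ b.toNat = 68 ∨ b.toNat = 69 ∨
        b.toNat = 70 ∨ b.toNat = 71 ∨ b.toNat = 72 ∨ b.toNat = 73 ∨ b.toNat = 74 := by
      have hv : b.toNat = b.val.toNat := rfl
      change (65 : Nat) ≤ _ at h1
      change _ ≤ (74 : Nat) at h2
      omega
    rcases hb with h | h | h | h | h | h | h | h | h | h <;>
      (have hb' := pvCharEq b h; subst hb'; simp [pvG, hget]; try decide)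
  · have hmem : b ∉ strArrA := by
      intro hmem
      apply h
      fin_cases hmem <;> exact ⟨by decide, by decide⟩
    have hidx : List.idxOf? b strArrA = none := List.idxOf?_eq_none_iff.mpr hmem
    simp [pvG, hget, PySem.List.index?, hidx, h]

theorem pvASide (l : List Char) :
    (((pvChunks l).flatMap pvG).map (fun n => (PySem.Int.toStr n).toList)).flatten =
      pvSpec l := by
  induction l using pvSpec.induct with
  | case1 => rw [pvChunks_nil]; rfl
  | case2 a => rw [pvChunks_one]; simp [pvG]; rfl
  | case3 a b t ih =>
      rw [pvChunks_cons2]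
      simp only [List.flatMap_cons, List.map_append, List.flatten_append, pvSpec]
      rw [pvG_pair, ih]

theorem pvBSide (l : List Char) : ∀ (j : Int), j % 2 = 0 →
    ((PySem.List.enumerate l j).filter
        (fun p => p.1 % 2 == 1 && decide ('A' ≤ p.2) && decide (p.2 ≤ 'J'))).map
      (fun p => Char.ofNat (p.2.toNat - 17)) = pvSpec l := by
  induction l using pvSpec.induct with
  | case1 => intro j hj; rfl
  | case2 a =>
      intro j hj
      have : (j % 2 == 1) = false := by simp; omega
      simp [PySem.List.enumerate, List.filter, this, pvSpec]
  | case3 a b t ih =>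
      intro j hj
      have h0 : (j % 2 == 1) = false := by simp; omega
      have h1 : ((j + 1) % 2 == 1) = true := by simp; omega
      have h2 : (j + 2) % 2 = 0 := by omega
      simp only [PySem.List.enumerate, List.filter_cons, h0, h1, Bool.false_and,
        Bool.true_and, pvSpec]
      have hstep : j + 1 + 1 = j + 2 := by ring
      by_cases hb : 'A' ≤ b ∧ b ≤ 'J'
      · simp [hb, hstep, ih (j + 2) h2]
      · rw [if_neg hb, hstep]
        rcases Decidable.not_and_iff_not_or_not.mp hb with hh | hh <;>
          simp [hh, ih (j + 2) h2]

-- ===== VERDICT (by name: the statement is the Claim_ definition above) =====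
theorem calc_local_path_ending_spec : Claim_equal_calc_local_path_ending := by
  intro data1 _
  simp only [Spec_calc_local_path_ending, calc_local_path_ending, calc_local_path_ending_alt]
  rw [pvFoldl_eq, List.nil_append]
  rw [show ((PySem.List.pyRange 0 ((PySem.List.slice data1.toList (some (-10)) none).length : Int) 2).map
      (fun i => PySem.List.slice (PySem.List.slice data1.toList (some (-10)) none) (some i) (some (i + 2)))) =
      pvChunks (PySem.List.slice data1.toList (some (-10)) none) from rfl]
  rw [pvASide, pvBSide _ 0 rfl]
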